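-- pv_equiv track=rewrite | github.com/pypi-data/pypi-mirror-36 | packages/geneseekr/geneseekr-0.1.8.tar.gz/geneseekr-0.1.8/geneseekr/geneseekr.py | interleaveblastresults
-- ===== SOURCE A (Python) =====
-- def interleaveblastresults(query, subject):
--     """
--     Creates an interleaved string that resembles BLAST sequence comparisons
--     :param query: Query sequence
--     :param subject: Subject sequence
--     :return: Properly formatted BLAST-like sequence comparison
--     """
--     # Initialise strings to hold the matches, and the final BLAST-formatted string
--     matchstring = str()
--     blaststring = str()
--     # Iterate through the query
--     for i, bp in enumerate(query):
--         # If the current base in the query is identical to the corresponding base in the reference, append a '|'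
--         # to the match string, otherwise, append a ' '
--         if bp == subject[i]:
--             matchstring += '|'
--         else:
--             matchstring += ' '
--     # Set a variable to store the progress through the sequence
--     prev = 0
--     # Iterate through the query, from start to finish in steps of 60 bp
--     for j in range(0, len(query), 60):
--         # BLAST results string. The components are: current position (padded to four characters), 'OLC', query
--         # sequence, \n, matches, \n, 'ref', subject sequence. Repeated until all the sequence data are present.
--         """
--         0000 OLC ATGAAGAAGATATTTGTAGCGGCTTTATTTGCTTTTGTTTCTGTTAATGCAATGGCAGCT
--                  ||||||||||| ||| | |||| ||||||||| || ||||||||||||||||||||||||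
--              ref ATGAAGAAGATGTTTATGGCGGTTTTATTTGCATTAGTTTCTGTTAATGCAATGGCAGCT
--         0060 OLC GATTGTGCAAAAGGTAAAATTGAGTTCTCTAAGTATAATGAGAATGATACATTCACAGTA
--                  ||||||||||||||||||||||||||||||||||||||||||||||||||||||||||||
--              ref GATTGTGCAAAAGGTAAAATTGAGTTCTCTAAGTATAATGAGAATGATACATTCACAGTA
--         """
--         blaststring += '{} OLC {}\n         {}\n     ref {}\n' \
--             .format('{:04d}'.format(j), query[prev:j + 60], matchstring[prev:j + 60], subject[prev:j + 60])
--         # Update the progress variable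
--         prev = j + 60
--     # Return the properly formatted string
--     return blaststring
-- ===== SOURCE B (Python) =====
-- def interleaveblastresults(query, subject):
--     """
--     Creates an interleaved string that resembles BLAST sequence comparisons
--     :param query: Query sequence
--     :param subject: Subject sequence
--     :return: Properly formatted BLAST-like sequence comparison
--     """
--     # Stage 1: split both sequences into lists of 60 bp chunks
--     qchunks = [query[j:j + 60] for j in range(0, len(query), 60)]
--     schunks = [subject[j:j + 60] for j in range(0, len(subject), 60)]
--     # Stage 2: format one block per zipped chunk pair; the match line is the zip
--     # of the two chunks, the position is reconstructed from the block number
--     blocks = ['{:04d} OLC {}\n         {}\n     ref {}\n'.format(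
--                   60 * k, qh,
--                   ''.join('|' if a == b else ' ' for a, b in zip(qh, sh)), sh)
--               for k, (qh, sh) in enumerate(zip(qchunks, schunks))]
--     # Stage 3: concatenate the blocks
--     return ''.join(blocks)
-- ===== Notes on version B (the rewrite author's own statement) =====
-- stated objective: alternative
-- what changed: B replaces A's index-based two-pass design (precompute a whole-sequence match string with enumerate/subject[i], then a range(0,len,60) loop slicing it with a carried 'prev' cursor) by a staged chunk-list design: split both strings into lists of 60-character chunks, zip the chunk lists, build each block's match line by zipping the paired chunks, map a block formatter over the pairs and join.
import Mathlib
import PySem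

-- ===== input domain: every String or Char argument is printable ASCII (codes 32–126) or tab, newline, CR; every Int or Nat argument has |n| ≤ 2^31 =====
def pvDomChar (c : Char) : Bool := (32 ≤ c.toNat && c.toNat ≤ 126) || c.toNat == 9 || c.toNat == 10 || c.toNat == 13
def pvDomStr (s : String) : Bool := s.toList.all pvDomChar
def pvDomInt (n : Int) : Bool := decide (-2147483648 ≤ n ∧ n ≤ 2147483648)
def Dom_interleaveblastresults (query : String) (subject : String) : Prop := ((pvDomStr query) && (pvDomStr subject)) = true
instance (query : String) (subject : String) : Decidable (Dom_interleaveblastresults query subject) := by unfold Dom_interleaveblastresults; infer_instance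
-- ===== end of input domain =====

-- B replaces A's index-based two passes (whole-sequence match string built with
-- subject[i], then a range loop slicing it with a carried cursor) by a staged
-- chunk-list design: split both strings into 60-char chunk lists, zip them,
-- map a block formatter over the pairs, join (objective: alternative).

-- '{:04d}'.format(j) — exact for j ≥ 0, the only values formatted here
def pvFmt04 (j : Int) : List Char :=
  let s := (PySem.Int.toStr j).toList
  List.replicate (4 - s.length) '0' ++ s

-- ===== PORT A =====
def interleaveblastresults (query : String) (subject : String) : String :=
  let q := query.toList
  let su := subject.toList
  -- first loop: whole-sequence match string (none branch = Python IndexError, excluded by Pre_)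
  let matchstring : List Char := (PySem.List.enumerate q).foldl
    (fun acc p =>
      match PySem.List.pyGet? su p.1 with
      | some c => acc ++ [if p.2 == c then '|' else ' ']
      | none => acc)
    []
  -- second loop: range(0, len(query), 60) with the carried 'prev' cursor
  let res := (PySem.List.pyRange 0 q.length 60).foldl
    (fun (st : List Char × Int) j =>
      (st.1 ++ pvFmt04 j ++ " OLC ".toList
        ++ PySem.List.slice q (some st.2) (some (j + 60)) ++ "\n         ".toList
        ++ PySem.List.slice matchstring (some st.2) (some (j + 60)) ++ "\n     ref ".toList
        ++ PySem.List.slice su (some st.2) (some (j + 60)) ++ "\n".toList,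
       j + 60))
    ([], 0)
  String.ofList res.1

-- ===== PORT B =====
-- Source B stage 1: the list of 60-char chunks of a string
def pvChunks (s : List Char) : List (List Char) :=
  (PySem.List.pyRange 0 s.length 60).map
    (fun j => PySem.List.slice s (some j) (some (j + 60)))

def interleaveblastresults_alt (query : String) (subject : String) : String :=
  let qchunks := pvChunks query.toList
  let schunks := pvChunks subject.toList
  -- stage 2: one block per zipped chunk pair (match line = zip of the chunks)
  let blocks := (PySem.List.enumerate (qchunks.zip schunks)).map
    (fun p => pvFmt04 (60 * p.1) ++ " OLC ".toList ++ p.2.1 ++ "\n         ".toList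
      ++ List.zipWith (fun a b => if a == b then '|' else ' ') p.2.1 p.2.2
      ++ "\n     ref ".toList ++ p.2.2 ++ "\n".toList)
  -- stage 3: join
  String.ofList blocks.flatten

-- ===== PRECONDITION & SPEC =====
-- Pre_ excludes exactly the inputs where A raises IndexError: subject shorter than query.
def Pre_interleaveblastresults (query : String) (subject : String) : Prop :=
  query.toList.length ≤ subject.toList.length
instance (query : String) (subject : String) : Decidable (Pre_interleaveblastresults query subject) := by unfold Pre_interleaveblastresults; infer_instance
def pvWitness_interleaveblastresults : String × String := ("AC", "AG")

def Spec_interleaveblastresults (query : String) (subject : String) (out : String) : Prop := out = interleaveblastresults_alt query subject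
instance (query : String) (subject : String) (out : String) : Decidable (Spec_interleaveblastresults query subject out) := by unfold Spec_interleaveblastresults; infer_instance

-- ===== CLAIM (what is proved, stated in full; the proofs are below) =====
def Claim_equal_interleaveblastresults : Prop := ∀ (query : String) (subject : String), Dom_interleaveblastresults query subject → Pre_interleaveblastresults query subject → Spec_interleaveblastresults query subject (interleaveblastresults query subject)

-- ===== LEMMAS AND PROOFS =====

-- the per-position match characters, as a structural recursion
def pvMspec (q su : List Char) (s : Nat) : List Char :=
  match q with
  | [] => []
  | c :: rest => (if c == su.getD s ' ' then '|' else ' ') :: pvMspec rest su (s + 1)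

lemma pvMspec_drop (q su : List Char) (s j : Nat) :
    (pvMspec q su s).drop j = pvMspec (q.drop j) su (s + j) := by
  induction q generalizing s j with
  | nil => simp [pvMspec]
  | cons c rest ih =>
    cases j with
    | zero => simp
    | succ k =>
      simp only [pvMspec, List.drop_succ_cons, ih]
      congr 1
      omega

lemma pvMspec_take (q su : List Char) (s k : Nat) :
    (pvMspec q su s).take k = pvMspec (q.take k) su s := by
  induction q generalizing s k with
  | nil => simp [pvMspec]
  | cons c rest ih =>
    cases k with
    | zero => simp [pvMspec]
    | succ m => simp [pvMspec, ih]

-- first loop of A computes pvMspec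
lemma pvMatch_fold (su : List Char) (q : List Char) (s : Nat) (acc : List Char)
    (h : s + q.length ≤ su.length) :
    (PySem.List.enumerate q (s : Int)).foldl
      (fun acc p =>
        match PySem.List.pyGet? su p.1 with
        | some c => acc ++ [if p.2 == c then '|' else ' ']
        | none => acc) acc
      = acc ++ pvMspec q su s := by
  induction q generalizing s acc with
  | nil => simp [PySem.List.enumerate_nil, pvMspec]
  | cons c rest ih =>
    simp only [List.length_cons] at h
    have hslen : s < su.length := by omega
    have hcast : (s : Int) + 1 = ((s + 1 : Nat) : Int) := by push_cast; ring
    rw [PySem.List.enumerate_cons, List.foldl_cons, hcast]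
    dsimp only
    rw [PySem.List.pyGet?_ofNat su s hslen]
    rw [ih (s + 1) _ (by omega)]
    simp [pvMspec, List.getElem?_eq_getElem hslen, List.getD_eq_getElem?_getD]

-- pvMspec is the zip of the query against the dropped subject (in range)
lemma pvMspec_zip (su : List Char) (q : List Char) (s : Nat)
    (h : s + q.length ≤ su.length) :
    pvMspec q su s
      = List.zipWith (fun a b => if a == b then '|' else ' ') q (su.drop s) := by
  induction q generalizing s with
  | nil => simp [pvMspec]
  | cons c rest ih =>
    simp only [List.length_cons] at h
    have hs : s < su.length := by omega
    have hdrop : su.drop s = su[s] :: su.drop (s + 1) :=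
      (List.drop_eq_getElem_cons hs)
    rw [pvMspec, hdrop, List.zipWith_cons_cons, ih (s + 1) (by omega)]
    congr 1
    rw [List.getD_eq_getElem _ _ hs]

-- range(a, b, 60) peels its head like range with step 1
lemma pvRange60_cons (a b : Int) (h : a < b) :
    PySem.List.pyRange a b 60 = a :: PySem.List.pyRange (a + 60) b 60 := by
  rw [PySem.List.pyRange_of_pos a b (by norm_num), PySem.List.pyRange_of_pos (a + 60) b (by norm_num)]
  rw [if_pos h]
  by_cases h2 : a + 60 < b
  · rw [if_pos h2]
    have hN : ((b - a + 60 - 1) / 60).toNat = ((b - (a + 60) + 60 - 1) / 60).toNat + 1 := by omega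
    rw [hN, List.range_succ_eq_map, List.map_cons, List.map_map]
    refine congrArg₂ _ (by simp) ?_
    apply List.map_congr_left
    intro k _
    simp only [Function.comp_apply]
    push_cast
    ring
  · rw [if_neg h2]
    have hN : ((b - a + 60 - 1) / 60).toNat = 1 := by omega
    rw [hN]
    simp

lemma pvRange60_nil (a b : Int) (h : b ≤ a) : PySem.List.pyRange a b 60 = [] := by
  rw [PySem.List.pyRange_of_pos a b (by norm_num)]
  simp [show ¬ a < b by omega]

-- query[j:j+60] under slice semantics
lemma pvSlice60 (xs : List Char) (j : Nat) :
    PySem.List.slice xs (some (j : Int)) (some ((j : Int) + 60)) = (xs.drop j).take 60 := by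
  have h : ((j : Int) + 60) = ((j : Int) + ((60 : Nat) : Int)) := by norm_num
  rw [h, PySem.List.slice_natCast_add]

-- common normal form: the blocks, chunk by chunk (fuel makes the recursion structural)
def pvBlock : Nat → List Char → List Char → Nat → List Char
  | 0, _, _, _ => []
  | fuel + 1, q, su, pos =>
    if q = [] then []
    else
      let qh := q.take 60
      let sh := su.take 60
      let m := List.zipWith (fun a b => if a == b then '|' else ' ') qh sh
      pvFmt04 (pos : Int) ++ " OLC ".toList ++ qh ++ "\n         ".toList
        ++ m ++ "\n     ref ".toList ++ sh ++ "\n".toList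
        ++ pvBlock fuel (q.drop 60) (su.drop 60) (pos + 60)

-- second loop of A equals pvBlock, block by block (fuel induction)
lemma pvBlocks (q su : List Char) (hpre : q.length ≤ su.length) :
    ∀ (fuel j : Nat) (acc : List Char), q.length - j ≤ fuel →
    ((PySem.List.pyRange (j : Int) (q.length : Int) 60).foldl
      (fun (st : List Char × Int) i =>
        (st.1 ++ pvFmt04 i ++ " OLC ".toList
          ++ PySem.List.slice q (some st.2) (some (i + 60)) ++ "\n         ".toList
          ++ PySem.List.slice (pvMspec q su 0) (some st.2) (some (i + 60)) ++ "\n     ref ".toList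
          ++ PySem.List.slice su (some st.2) (some (i + 60)) ++ "\n".toList,
         i + 60))
      (acc, (j : Int))).1 = acc ++ pvBlock fuel (q.drop j) (su.drop j) j := by
  intro fuel
  induction fuel with
  | zero =>
    intro j acc hf
    have hj : q.length ≤ j := by omega
    rw [pvRange60_nil _ _ (by exact_mod_cast hj)]
    simp [pvBlock]
  | succ fuel ih =>
    intro j acc hf
    by_cases hj : j < q.length
    · rw [pvRange60_cons _ _ (by exact_mod_cast hj), List.foldl_cons]
      dsimp only
      rw [pvSlice60 q j, pvSlice60 su j, pvSlice60 (pvMspec q su 0) j,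
          pvMspec_drop, pvMspec_take, Nat.zero_add]
      have hz : pvMspec ((q.drop j).take 60) su j
          = List.zipWith (fun a b => if a == b then '|' else ' ')
              ((q.drop j).take 60) ((su.drop j).take 60) := by
        rw [pvMspec_zip su _ j (by simp; omega)]
        have := List.take_zipWith (f := fun a b => if a == b then '|' else ' ')
          (l := (q.drop j).take 60) (l' := su.drop j) (i := 60)
        rw [List.take_take, min_self] at this
        rw [← this]
        exact (List.take_of_length_le (by simp)).symm
      rw [hz]
      have hcast : ((j : Int) + 60) = (((j + 60 : Nat)) : Int) := by push_cast; ring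
      rw [hcast, ih (j + 60) _ (by omega)]
      have hq : q.drop j ≠ [] := by
        simp [List.drop_eq_nil_iff]; omega
      conv_rhs => rw [show pvBlock (fuel + 1) (q.drop j) (su.drop j) j
        = (if (q.drop j) = [] then []
           else pvFmt04 (j : Int) ++ " OLC ".toList ++ (q.drop j).take 60 ++ "\n         ".toList
             ++ List.zipWith (fun a b => if a == b then '|' else ' ') ((q.drop j).take 60) ((su.drop j).take 60)
             ++ "\n     ref ".toList ++ (su.drop j).take 60 ++ "\n".toList
             ++ pvBlock fuel ((q.drop j).drop 60) ((su.drop j).drop 60) (j + 60)) from rfl]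
      rw [if_neg hq]
      simp [List.drop_drop, List.append_assoc]
    · rw [pvRange60_nil _ _ (by exact_mod_cast (by omega : q.length ≤ j))]
      rw [List.drop_eq_nil_of_le (by omega)]
      simp [pvBlock]

-- B's mapped, zipped chunk lists flatten to pvBlock, chunk pair by chunk pair
lemma pvBzip (q su : List Char) (hpre : q.length ≤ su.length) :
    ∀ (fuel k : Nat), q.length - 60 * k ≤ fuel →
    ((PySem.List.enumerate
        (((PySem.List.pyRange ((60 * k : Nat) : Int) q.length 60).map
            (fun j => PySem.List.slice q (some j) (some (j + 60)))).zip
          ((PySem.List.pyRange ((60 * k : Nat) : Int) su.length 60).map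
            (fun j => PySem.List.slice su (some j) (some (j + 60)))))
        (k : Int)).map
        (fun p => pvFmt04 (60 * p.1) ++ " OLC ".toList ++ p.2.1 ++ "\n         ".toList
          ++ List.zipWith (fun a b => if a == b then '|' else ' ') p.2.1 p.2.2
          ++ "\n     ref ".toList ++ p.2.2 ++ "\n".toList)).flatten
      = pvBlock fuel (q.drop (60 * k)) (su.drop (60 * k)) (60 * k) := by
  intro fuel
  induction fuel with
  | zero =>
    intro k hf
    have hk : q.length ≤ 60 * k := by omega
    rw [pvRange60_nil _ _ (by exact_mod_cast hk)]
    simp [pvBlock, PySem.List.enumerate_nil]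
  | succ fuel ih =>
    intro k hf
    by_cases hk : 60 * k < q.length
    · rw [pvRange60_cons ((60 * k : Nat) : Int) _ (by exact_mod_cast hk),
          pvRange60_cons ((60 * k : Nat) : Int) _ (by exact_mod_cast (by omega : 60 * k < su.length))]
      rw [List.map_cons, List.map_cons, List.zip_cons_cons, PySem.List.enumerate_cons,
          List.map_cons, List.flatten_cons]
      dsimp only
      rw [pvSlice60 q (60 * k), pvSlice60 su (60 * k)]
      have hcast : ((60 * k : Nat) : Int) + 60 = ((60 * (k + 1) : Nat) : Int) := by push_cast; ring
      have hcast2 : (k : Int) + 1 = ((k + 1 : Nat) : Int) := by push_cast; ring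
      rw [hcast, hcast2, ih (k + 1) (by omega)]
      have hq : q.drop (60 * k) ≠ [] := by
        simp [List.drop_eq_nil_iff]; omega
      conv_rhs => rw [show pvBlock (fuel + 1) (q.drop (60 * k)) (su.drop (60 * k)) (60 * k)
        = (if (q.drop (60 * k)) = [] then []
           else pvFmt04 ((60 * k : Nat) : Int) ++ " OLC ".toList ++ (q.drop (60 * k)).take 60 ++ "\n         ".toList
             ++ List.zipWith (fun a b => if a == b then '|' else ' ') ((q.drop (60 * k)).take 60) ((su.drop (60 * k)).take 60)
             ++ "\n     ref ".toList ++ (su.drop (60 * k)).take 60 ++ "\n".toList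
             ++ pvBlock fuel ((q.drop (60 * k)).drop 60) ((su.drop (60 * k)).drop 60) (60 * k + 60)) from rfl]
      rw [if_neg hq]
      have hmul : (60 : Int) * (k : Int) = ((60 * k : Nat) : Int) := by push_cast; ring
      have h3 : 60 * (k + 1) = 60 * k + 60 := by ring
      simp only [hmul, h3, List.drop_drop, List.append_assoc]
    · rw [pvRange60_nil _ _ (by exact_mod_cast (by omega : q.length ≤ 60 * k))]
      rw [List.drop_eq_nil_of_le (by omega)]
      simp [pvBlock, PySem.List.enumerate_nil]

-- ===== VERDICT (by name: the statement is the Claim_ definition above) =====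
theorem interleaveblastresults_spec : Claim_equal_interleaveblastresults := by
  intro query subject _hdom hpre
  unfold Pre_interleaveblastresults at hpre
  simp only [Spec_interleaveblastresults, interleaveblastresults, interleaveblastresults_alt,
    pvChunks]
  have hm := pvMatch_fold subject.toList query.toList 0 [] (by omega)
  simp only [Nat.cast_zero, List.nil_append] at hm
  rw [hm]
  have hb := pvBlocks query.toList subject.toList hpre query.toList.length 0 [] (by omega)
  simp only [Nat.cast_zero, List.nil_append, List.drop_zero] at hb
  rw [hb]
  have hz := pvBzip query.toList subject.toList hpre query.toList.length 0 (by omega)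
  simp only [Nat.mul_zero, Nat.cast_zero, List.drop_zero] at hz
  rw [hz]
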